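-- pv_equiv track=rewrite | github.com/arunraja-hub/APPuSSA | bilstm_acoustic.py | preprocess_sentence
-- ===== SOURCE A (Python) =====
-- def preprocess_sentence(sentence):
--     PUNCTUATION_MARKS = [
--   '<FULL_STOP>', '<COMMA>', '<QUESTION_MARK>', '<EXCLAMATION_MARK>', '<DOTS>']
--     output_words = []
--     output_punctuation_marks = []
--
--     id_ = sentence.split()[0]
--     words = sentence.split()[1:]
--     for (word, punctuation_mark) in zip(words, words[1:] + [None]):
--         if word in PUNCTUATION_MARKS:
--             continue
--
--         if punctuation_mark not in PUNCTUATION_MARKS: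
--             punctuation_mark = "<SPACE>"
--
--         output_words.append(word)
--         output_punctuation_marks.append(punctuation_mark)
--
--   #   return [id_,
--   #     " ".join(output_words),
--   #     " ".join(output_punctuation_marks)
--   # ]
--
--     return [id_,
--       "<start> %s <end>" % " ".join(output_words),
--       "<start> %s <end>" % " ".join(output_punctuation_marks)]
-- ===== SOURCE B (Python) =====
-- def preprocess_sentence(sentence):
--     PUNCTUATION_MARKS = {
--         '<FULL_STOP>', '<COMMA>', '<QUESTION_MARK>', '<EXCLAMATION_MARK>', '<DOTS>'}
--     tokens = sentence.split()
--     id_ = tokens[0]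
--     output_words = []
--     output_punctuation_marks = []
--     prev_was_word = False
--     for tok in tokens[1:]:
--         if tok in PUNCTUATION_MARKS:
--             if prev_was_word:
--                 output_punctuation_marks[-1] = tok
--             prev_was_word = False
--         else:
--             output_words.append(tok)
--             output_punctuation_marks.append("<SPACE>")
--             prev_was_word = True
--     return [id_,
--             "<start> %s <end>" % " ".join(output_words),
--             "<start> %s <end>" % " ".join(output_punctuation_marks)]
-- ===== Notes on version B (the rewrite author's own statement) =====
-- stated objective: alternative
-- what changed: Replaces A's zip-with-lookahead pairing (each word paired with its successor token) by a single forward pass keeping a prev_was_word flag that retroactively overwrites the last space placeholder when a punctuation token follows a word.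
import Mathlib
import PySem

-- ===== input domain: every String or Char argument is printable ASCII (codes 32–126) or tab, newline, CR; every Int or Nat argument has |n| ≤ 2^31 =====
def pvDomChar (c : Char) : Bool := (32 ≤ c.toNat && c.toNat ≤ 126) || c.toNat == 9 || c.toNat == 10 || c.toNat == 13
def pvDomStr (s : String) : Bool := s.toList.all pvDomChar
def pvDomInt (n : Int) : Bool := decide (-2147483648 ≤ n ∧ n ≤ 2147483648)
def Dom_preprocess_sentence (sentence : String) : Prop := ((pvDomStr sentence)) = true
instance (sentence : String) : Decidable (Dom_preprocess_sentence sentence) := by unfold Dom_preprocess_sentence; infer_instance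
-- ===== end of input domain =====

-- B replaces A's zip-with-lookahead pairing by a single forward pass with a prev_was_word
-- flag that retroactively overwrites the last space placeholder when a punctuation token follows a word (objective: alternative).

-- ===== PORT A =====
def pvPUNCT : List String :=
  ["<FULL_STOP>", "<COMMA>", "<QUESTION_MARK>", "<EXCLAMATION_MARK>", "<DOTS>"]

def pvIsPunct (w : String) : Bool := pvPUNCT.contains w

-- loop body of A: state = (output_words, output_punctuation_marks)
def pvAStep (st : List String × List String) (pair : String × Option String) :
    List String × List String :=
  if pvIsPunct pair.1 then st
  else
    let pm := match pair.2 with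
      | some p => if pvIsPunct p then p else "<SPACE>"
      | none => "<SPACE>"
    (st.1 ++ [pair.1], st.2 ++ [pm])

def preprocess_sentence (sentence : String) : List String :=
  match PySem.Str.split₀ sentence with
  | [] => []   -- here A raises IndexError indexing the first token; excluded by Pre_
  | id_ :: words =>
    let pairs := words.zip ((words.drop 1).map some ++ [none])
    let st := pairs.foldl pvAStep ([], [])
    [id_,
     "<start> " ++ PySem.Str.join " " st.1 ++ " <end>",
     "<start> " ++ PySem.Str.join " " st.2 ++ " <end>"]

-- ===== PORT B =====
-- loop body of B: state = (output_words, output_punctuation_marks, prev_was_word)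
def pvBStep (st : List String × List String × Bool) (tok : String) :
    List String × List String × Bool :=
  if pvIsPunct tok then
    if st.2.2 then (st.1, st.2.1.dropLast ++ [tok], false)
    else (st.1, st.2.1, false)
  else (st.1 ++ [tok], st.2.1 ++ ["<SPACE>"], true)

def preprocess_sentence_alt (sentence : String) : List String :=
  match PySem.Str.split₀ sentence with
  | [] => []   -- here B raises IndexError indexing the first token; excluded by Pre_
  | id_ :: words =>
    let st := words.foldl pvBStep ([], [], false)
    [id_,
     "<start> " ++ PySem.Str.join " " st.1 ++ " <end>",
     "<start> " ++ PySem.Str.join " " st.2.1 ++ " <end>"]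

-- ===== PRECONDITION & SPEC =====
-- Pre_ excludes exactly the inputs with no whitespace-separated token
-- (empty or all-whitespace sentence), where A raises IndexError indexing the first token.
def Pre_preprocess_sentence (sentence : String) : Prop :=
  PySem.Str.split₀ sentence ≠ []
instance (sentence : String) : Decidable (Pre_preprocess_sentence sentence) := by
  unfold Pre_preprocess_sentence; infer_instance

def pvWitness_preprocess_sentence : String := "id1 hello <COMMA> world <FULL_STOP>"

def Spec_preprocess_sentence (sentence : String) (out : List String) : Prop :=
  out = preprocess_sentence_alt sentence
instance (sentence : String) (out : List String) : Decidable (Spec_preprocess_sentence sentence out) := by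
  unfold Spec_preprocess_sentence; infer_instance

-- ===== CLAIM (what is proved, stated in full; the proofs are below) =====
def Claim_equal_preprocess_sentence : Prop :=
  ∀ (sentence : String), Dom_preprocess_sentence sentence →
    Pre_preprocess_sentence sentence →
    Spec_preprocess_sentence sentence (preprocess_sentence sentence)

-- ===== LEMMAS AND PROOFS =====

-- common specification of both loops: the (words, punctuation) pair produced from a word list
def pvQ (rest : List String) : String :=
  match rest with
  | [] => "<SPACE>"
  | r :: _ => if pvIsPunct r then r else "<SPACE>"

def pvS : List String → List String × List String
  | [] => ([], [])
  | w :: rest =>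
      if pvIsPunct w then pvS rest
      else (w :: (pvS rest).1, pvQ rest :: (pvS rest).2)

theorem pvA_fold (words : List String) (ws ps : List String) :
    (words.zip ((words.drop 1).map some ++ [none])).foldl pvAStep (ws, ps) =
      (ws ++ (pvS words).1, ps ++ (pvS words).2) := by
  induction words generalizing ws ps with
  | nil => simp [pvS]
  | cons w rest ih =>
    have hz : (w :: rest).zip (((w :: rest).drop 1).map some ++ [none]) =
        (w, rest.head?) :: rest.zip ((rest.drop 1).map some ++ [none]) := by
      cases rest <;> simp
    rw [hz, List.foldl_cons]
    by_cases hp : pvIsPunct w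
    · rw [show pvAStep (ws, ps) (w, rest.head?) = (ws, ps) from by simp [pvAStep, hp]]
      rw [ih]; simp [pvS, hp]
    · have hstep : pvAStep (ws, ps) (w, rest.head?) = (ws ++ [w], ps ++ [pvQ rest]) := by
        cases rest with
        | nil => simp [pvAStep, hp, pvQ]
        | cons r rest' =>
          simp only [pvAStep, hp, if_neg, Bool.false_eq_true, not_false_iff, List.head?_cons]
          cases hr : pvIsPunct r <;> simp [pvQ, hr]
      rw [hstep, ih]; simp [pvS, hp, pvQ]

theorem pvB_fold (words : List String) :
    (∀ ws ps, words.foldl pvBStep (ws, ps, false) =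
      (ws ++ (pvS words).1, ps ++ (pvS words).2,
        (words.foldl pvBStep (ws, ps, false)).2.2)) ∧
    (∀ ws ps, words.foldl pvBStep (ws, ps ++ ["<SPACE>"], true) =
      (ws ++ (pvS words).1, ps ++ [pvQ words] ++ (pvS words).2,
        (words.foldl pvBStep (ws, ps ++ ["<SPACE>"], true)).2.2)) := by
  induction words with
  | nil => constructor <;> intro ws ps <;> simp [pvS, pvQ]
  | cons w rest ih =>
    obtain ⟨ih1, ih2⟩ := ih
    constructor
    · intro ws ps
      by_cases hp : pvIsPunct w
      · simpa [List.foldl, pvBStep, hp, pvS] using ih1 ws ps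
      · have := ih2 (ws ++ [w]) ps
        simpa [List.foldl, pvBStep, hp, pvS, pvQ] using this
    · intro ws ps
      by_cases hp : pvIsPunct w
      · have h1 := ih1 ws (ps ++ [w])
        simp only [List.foldl, pvBStep, hp, if_pos]
        simp only [List.dropLast_concat]
        simpa [pvS, pvQ, hp] using h1
      · have := ih2 (ws ++ [w]) (ps ++ ["<SPACE>"])
        simp only [List.foldl, pvBStep, hp]
        simpa [pvS, pvQ, hp] using this

-- ===== VERDICT (by name: the statement is the Claim_ definition above) =====
theorem preprocess_sentence_spec : Claim_equal_preprocess_sentence := by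
  intro sentence _ hpre
  unfold Spec_preprocess_sentence preprocess_sentence preprocess_sentence_alt
  cases h : PySem.Str.split₀ sentence with
  | nil => exact absurd h hpre
  | cons id_ words =>
    have hA := pvA_fold words [] []
    have hB := (pvB_fold words).1 [] []
    simp only [hA]
    rw [hB]
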